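-- pv_equiv track=rewrite | github.com/Zapleo159/CPEN442-AS2 | code/substitution.py | embed_plain_in_cipher
-- ===== SOURCE A (Python) =====
-- def embed_plain_in_cipher(cipher_to_plain, ciphertext, print_with_space=True):
--     """
--     Embeds the plaintext in the ciphertext using the letter map
--     In an easy to read way.
--     """
--
--     embedded_plaintext = ""
--     last_char_replaced = False
--
--     for char in ciphertext:
--         if cipher_to_plain.get(char):
--             if print_with_space:
--                 if last_char_replaced:
--                     embedded_plaintext += f"{cipher_to_plain[char].lower()}"
--                 else:
--                     last_char_replaced = True
--                     embedded_plaintext += f" {cipher_to_plain[char].lower()}"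
--             else:
--                 embedded_plaintext += f"{cipher_to_plain[char].lower()}"
--         else:
--             if print_with_space:
--                 if last_char_replaced:
--                     embedded_plaintext += f" {char}"
--                     last_char_replaced = False
--                 else:
--                     embedded_plaintext += f"{char}"
--             else:
--                 embedded_plaintext += f"{char}"
--
--     return embedded_plaintext
-- ===== SOURCE B (Python) =====
-- def embed_plain_in_cipher(cipher_to_plain, ciphertext, print_with_space=True):
--     """Run-based re-implementation: group the ciphertext into maximal runs of
--     mapped/unmapped characters, render each run, and join runs with spaces."""
--
--     def mapped(c):
--         return bool(cipher_to_plain.get(c))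
--
--     def text(c):
--         return cipher_to_plain[c].lower() if mapped(c) else c
--
--     if not print_with_space:
--         return "".join(text(c) for c in ciphertext)
--     if not ciphertext:
--         return ""
--     parts = []
--     i, n = 0, len(ciphertext)
--     while i < n:
--         j = i
--         m = mapped(ciphertext[i])
--         while j < n and mapped(ciphertext[j]) == m:
--             j += 1
--         parts.append("".join(text(c) for c in ciphertext[i:j]))
--         i = j
--     s = " ".join(parts)
--     return " " + s if mapped(ciphertext[0]) else s
-- ===== Notes on version B (the rewrite author's own statement) =====
-- stated objective: alternative
-- what changed: Replaced A's per-character last_char_replaced state machine with a run-based traversal: split the ciphertext into maximal runs of equal mapped-status, render each run (lowercased mapped values / raw characters), and join the runs with single spaces, with a leading space iff the first run is mapped.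
import Mathlib
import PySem

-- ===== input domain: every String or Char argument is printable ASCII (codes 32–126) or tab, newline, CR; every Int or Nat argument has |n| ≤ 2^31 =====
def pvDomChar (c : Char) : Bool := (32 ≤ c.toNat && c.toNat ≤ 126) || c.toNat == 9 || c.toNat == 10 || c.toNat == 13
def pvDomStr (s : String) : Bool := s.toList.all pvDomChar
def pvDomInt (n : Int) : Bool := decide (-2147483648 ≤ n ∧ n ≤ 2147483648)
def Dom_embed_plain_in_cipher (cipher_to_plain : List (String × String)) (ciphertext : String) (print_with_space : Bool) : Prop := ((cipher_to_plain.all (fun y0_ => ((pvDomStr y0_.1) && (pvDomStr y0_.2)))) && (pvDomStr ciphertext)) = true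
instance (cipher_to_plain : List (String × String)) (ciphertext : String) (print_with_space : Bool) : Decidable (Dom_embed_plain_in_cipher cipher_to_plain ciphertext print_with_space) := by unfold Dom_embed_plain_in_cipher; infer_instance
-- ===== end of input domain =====

-- B replaces A's per-character `last_char_replaced` state machine by a run-based
-- traversal (maximal runs of equal mapped-status, joined with single spaces);
-- objective: alternative decomposition, same cost.

-- ===== PORT A =====
-- `cipher_to_plain.get(char)`'s value as a list of chars ("" both for a missing
-- key and for an empty mapped value — both are falsy in Python's `if d.get(c):`).
def pvVal (cipher_to_plain : List (String × String)) (ch : Char) : List Char :=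
  (PySem.Dict.getD (PySem.Dict.mk cipher_to_plain) (String.ofList [ch]) "").toList

def embed_plain_in_cipher (cipher_to_plain : List (String × String)) (ciphertext : String) (print_with_space : Bool) : String :=
  String.ofList
    (ciphertext.toList.foldl
      (fun (st : List Char × Bool) ch =>
        let v := pvVal cipher_to_plain ch
        if v ≠ [] then
          if print_with_space then
            if st.2 then (st.1 ++ PySem.Chars.lower v, st.2)
            else (st.1 ++ ' ' :: PySem.Chars.lower v, true)
          else (st.1 ++ PySem.Chars.lower v, st.2)
        else
          if print_with_space then
            if st.2 then (st.1 ++ [' ', ch], false)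
            else (st.1 ++ [ch], st.2)
          else (st.1 ++ [ch], st.2))
      ([], false)).1

-- ===== PORT B =====
def pvMapped (cipher_to_plain : List (String × String)) (ch : Char) : Bool :=
  pvVal cipher_to_plain ch ≠ []

def pvText (cipher_to_plain : List (String × String)) (ch : Char) : List Char :=
  if pvMapped cipher_to_plain ch then PySem.Chars.lower (pvVal cipher_to_plain ch) else [ch]

-- the inner `while j < n and mapped(ciphertext[j]) == m: j += 1` loop: the
-- longest prefix of status m, and the remainder
def pvTakeRun (f : Char → Bool) (m : Bool) : List Char → List Char × List Char
  | [] => ([], [])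
  | c :: cs =>
    if f c = m then
      let p := pvTakeRun f m cs
      (c :: p.1, p.2)
    else ([], c :: cs)

theorem pvTakeRun_rest_length (f : Char → Bool) (m : Bool) :
    ∀ cs : List Char, (pvTakeRun f m cs).2.length ≤ cs.length := by
  intro cs
  induction cs with
  | nil => simp [pvTakeRun]
  | cons c cs ih =>
    simp only [pvTakeRun]
    split
    · simpa using Nat.le_succ_of_le ih
    · simp

-- the outer `while i < n` loop: the list of maximal runs of equal status
def pvRuns (f : Char → Bool) : List Char → List (List Char)
  | [] => []
  | c :: cs =>
    let p := pvTakeRun f (f c) cs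
    (c :: p.1) :: pvRuns f p.2
termination_by cs => cs.length
decreasing_by
  simpa using Nat.lt_succ_of_le (pvTakeRun_rest_length f (f c) cs)

def embed_plain_in_cipher_alt (cipher_to_plain : List (String × String)) (ciphertext : String) (print_with_space : Bool) : String :=
  if !print_with_space then
    String.ofList (PySem.Chars.join [] (ciphertext.toList.map (pvText cipher_to_plain)))
  else
    match ciphertext.toList with
    | [] => ""
    | c :: _ =>
      let parts := (pvRuns (pvMapped cipher_to_plain) ciphertext.toList).map
        (fun r => PySem.Chars.join [] (r.map (pvText cipher_to_plain)))
      let s := PySem.Chars.join [' '] parts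
      String.ofList (if pvMapped cipher_to_plain c then ' ' :: s else s)

-- ===== PRECONDITION & SPEC =====
def Spec_embed_plain_in_cipher (cipher_to_plain : List (String × String)) (ciphertext : String) (print_with_space : Bool) (out : String) : Prop := out = embed_plain_in_cipher_alt cipher_to_plain ciphertext print_with_space
instance (cipher_to_plain : List (String × String)) (ciphertext : String) (print_with_space : Bool) (out : String) : Decidable (Spec_embed_plain_in_cipher cipher_to_plain ciphertext print_with_space out) := by unfold Spec_embed_plain_in_cipher; infer_instance

-- ===== CLAIM (what is proved, stated in full; the proofs are below) =====
def Claim_equal_embed_plain_in_cipher : Prop := ∀ (cipher_to_plain : List (String × String)) (ciphertext : String) (print_with_space : Bool), Dom_embed_plain_in_cipher cipher_to_plain ciphertext print_with_space → Spec_embed_plain_in_cipher cipher_to_plain ciphertext print_with_space (embed_plain_in_cipher cipher_to_plain ciphertext print_with_space)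


-- ===== LEMMAS AND PROOFS =====

-- A's loop body for print_with_space = True / False, as named functions
def pvStepS (d : List (String × String)) (st : List Char × Bool) (ch : Char) : List Char × Bool :=
  let v := pvVal d ch
  if v ≠ [] then
    if st.2 then (st.1 ++ PySem.Chars.lower v, st.2)
    else (st.1 ++ ' ' :: PySem.Chars.lower v, true)
  else
    if st.2 then (st.1 ++ [' ', ch], false)
    else (st.1 ++ [ch], st.2)

def pvStepP (d : List (String × String)) (st : List Char × Bool) (ch : Char) : List Char × Bool :=
  let v := pvVal d ch
  if v ≠ [] then (st.1 ++ PySem.Chars.lower v, st.2)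
  else (st.1 ++ [ch], st.2)

theorem pvPortA_true (d : List (String × String)) (ct : String) :
    embed_plain_in_cipher d ct true =
      String.ofList ((ct.toList.foldl (pvStepS d) ([], false)).1) := rfl

theorem pvPortA_false (d : List (String × String)) (ct : String) :
    embed_plain_in_cipher d ct false =
      String.ofList ((ct.toList.foldl (pvStepP d) ([], false)).1) := rfl

-- A's spaced loop, rewritten as a recursion: a space is emitted exactly when the
-- current char's mapped-status differs from `last`.
def pvALoop (d : List (String × String)) (last : Bool) : List Char → List Char
  | [] => []
  | c :: cs =>
    (if pvMapped d c ≠ last then [' '] else []) ++ pvText d c ++ pvALoop d (pvMapped d c) cs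

theorem pvAFold_spaced (d : List (String × String)) :
    ∀ (cs : List Char) (s : List Char) (last : Bool),
      (cs.foldl (pvStepS d) (s, last)).1 = s ++ pvALoop d last cs := by
  intro cs
  induction cs with
  | nil => intro s last; simp [pvALoop]
  | cons c cs ih =>
    intro s last
    rw [List.foldl_cons]
    by_cases hv : pvVal d c = []
    · cases last
      · rw [show pvStepS d (s, false) c = (s ++ [c], false) by simp [pvStepS, hv]]
        simp [ih, pvALoop, pvMapped, pvText, hv]
      · rw [show pvStepS d (s, true) c = (s ++ [' ', c], false) by simp [pvStepS, hv]]
        simp [ih, pvALoop, pvMapped, pvText, hv]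
    · cases last
      · rw [show pvStepS d (s, false) c =
            (s ++ ' ' :: PySem.Chars.lower (pvVal d c), true) by simp [pvStepS, hv]]
        simp [ih, pvALoop, pvMapped, pvText, hv]
      · rw [show pvStepS d (s, true) c =
            (s ++ PySem.Chars.lower (pvVal d c), true) by simp [pvStepS, hv]]
        simp [ih, pvALoop, pvMapped, pvText, hv]

theorem pvJoin_nil_cons (p : List Char) (rest : List (List Char)) :
    PySem.Chars.join [] (p :: rest) = p ++ PySem.Chars.join [] rest := by
  cases rest with
  | nil => simp [PySem.Chars.join_singleton]
  | cons q r => simp [PySem.Chars.join_cons_cons]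

theorem pvAFold_plain (d : List (String × String)) :
    ∀ (cs : List Char) (s : List Char) (last : Bool),
      (cs.foldl (pvStepP d) (s, last)).1 = s ++ PySem.Chars.join [] (cs.map (pvText d)) := by
  intro cs
  induction cs with
  | nil => intro s last; simp [PySem.Chars.join_nil]
  | cons c cs ih =>
    intro s last
    rw [List.foldl_cons]
    by_cases hv : pvVal d c = []
    · rw [show pvStepP d (s, last) c = (s ++ [c], last) by simp [pvStepP, hv]]
      simp [ih, pvJoin_nil_cons, pvText, pvMapped, hv]
    · rw [show pvStepP d (s, last) c =
          (s ++ PySem.Chars.lower (pvVal d c), last) by simp [pvStepP, hv]]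
      simp [ih, pvJoin_nil_cons, pvText, pvMapped, hv]

theorem pvTakeRun_split (f : Char → Bool) (m : Bool) :
    ∀ cs : List Char, (pvTakeRun f m cs).1 ++ (pvTakeRun f m cs).2 = cs := by
  intro cs
  induction cs with
  | nil => simp [pvTakeRun]
  | cons c cs ih =>
    simp only [pvTakeRun]
    split
    · simpa using ih
    · simp

theorem pvTakeRun_all (f : Char → Bool) (m : Bool) :
    ∀ cs : List Char, ∀ x ∈ (pvTakeRun f m cs).1, f x = m := by
  intro cs
  induction cs with
  | nil => simp [pvTakeRun]
  | cons c cs ih =>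
    simp only [pvTakeRun]
    split
    · next h =>
      intro x hx
      rcases List.mem_cons.1 hx with rfl | hx
      · exact h
      · exact ih x hx
    · simp

theorem pvTakeRun_rest_head (f : Char → Bool) (m : Bool) :
    ∀ cs : List Char, ∀ c cs', (pvTakeRun f m cs).2 = c :: cs' → f c ≠ m := by
  intro cs
  induction cs with
  | nil => simp [pvTakeRun]
  | cons c cs ih =>
    simp only [pvTakeRun]
    split
    · exact fun c' cs' h => ih c' cs' h
    · next h => rintro c' cs' hc; cases hc; exact h

-- consuming one whole run of status m from state m emits no space
theorem pvALoop_run (d : List (String × String)) (m : Bool) :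
    ∀ (r rest : List Char), (∀ x ∈ r, pvMapped d x = m) →
      pvALoop d m (r ++ rest) = PySem.Chars.join [] (r.map (pvText d)) ++ pvALoop d m rest := by
  intro r
  induction r with
  | nil => intro rest _; simp [PySem.Chars.join_nil]
  | cons c r ih =>
    intro rest h
    have hc : pvMapped d c = m := h c (List.mem_cons_self)
    simp only [List.cons_append, pvALoop, hc, pvJoin_nil_cons, List.map_cons]
    simp [ih rest (fun x hx => h x (List.mem_cons_of_mem _ hx))]

theorem pvALoop_runs (d : List (String × String)) :
    ∀ (n : ℕ) (cs : List Char), cs.length ≤ n → ∀ c cs', cs = c :: cs' →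
      pvALoop d (pvMapped d c) cs =
        PySem.Chars.join [' ']
          ((pvRuns (pvMapped d) cs).map (fun r => PySem.Chars.join [] (r.map (pvText d)))) := by
  intro n
  induction n with
  | zero => intro cs hlen c cs' hcs; subst hcs; simp at hlen
  | succ n ih =>
    intro cs hlen c cs' hcs
    subst hcs
    set f := pvMapped d with hf
    set m := f c with hm
    obtain ⟨r, rest, hr1, hr2⟩ :
        ∃ r rest, pvTakeRun f m cs' = (r, rest) ∧ r ++ rest = cs' :=
      ⟨(pvTakeRun f m cs').1, (pvTakeRun f m cs').2, rfl, pvTakeRun_split f m cs'⟩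
    have hall : ∀ x ∈ c :: r, f x = m := by
      intro x hx
      rcases List.mem_cons.1 hx with rfl | hx
      · rfl
      · have := pvTakeRun_all f m cs' x; rw [hr1] at this; exact this hx
    have hruns : pvRuns f (c :: cs') = (c :: r) :: pvRuns f rest := by
      rw [pvRuns]; simp only [← hm]; rw [hr1]
    have hstep : pvALoop d m (c :: cs') =
        PySem.Chars.join [] ((c :: r).map (pvText d)) ++ pvALoop d m rest := by
      have hsplit : c :: cs' = (c :: r) ++ rest := by simp [hr2]
      rw [hsplit]
      exact pvALoop_run d m (c :: r) rest hall
    cases rest with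
    | nil =>
      rw [hstep, hruns]
      simp [pvALoop, pvRuns, PySem.Chars.join_singleton]
    | cons c₂ rest' =>
      have hne : f c₂ ≠ m := by
        have := pvTakeRun_rest_head f m cs' c₂ rest'; rw [hr1] at this; exact this rfl
      have hlen2 : (c₂ :: rest').length ≤ n := by
        have h1 : (c₂ :: rest').length ≤ cs'.length := by
          have := pvTakeRun_rest_length f m cs'; rw [hr1] at this; simpa using this
        have h2 : cs'.length + 1 ≤ n + 1 := by simpa using hlen
        omega
      have hrec := ih (c₂ :: rest') hlen2 c₂ rest' rfl
      have hshift : pvALoop d m (c₂ :: rest') = ' ' :: pvALoop d (f c₂) (c₂ :: rest') := by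
        simp [pvALoop, ← hf, hne]
      have hnonempty : (pvRuns f (c₂ :: rest')).map
          (fun r => PySem.Chars.join [] (r.map (pvText d))) ≠ [] := by
        rw [pvRuns]; simp
      rw [hstep, hruns, hshift, hrec]
      rcases List.exists_cons_of_ne_nil hnonempty with ⟨p, L, hp⟩
      simp only [List.map_cons]
      rw [hp, PySem.Chars.join_cons_cons]
      simp

-- starting from last = False: a leading space appears iff the first char is mapped
theorem pvALoop_false_start (d : List (String × String)) (c : Char) (cs : List Char) :
    pvALoop d false (c :: cs) =
      (if pvMapped d c then [' '] else []) ++ pvALoop d (pvMapped d c) (c :: cs) := by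
  cases hm : pvMapped d c <;> simp [pvALoop, hm]

-- ===== VERDICT (by name: the statement is the Claim_ definition above) =====
theorem embed_plain_in_cipher_spec : Claim_equal_embed_plain_in_cipher := by
  intro d ct pws _
  unfold Spec_embed_plain_in_cipher
  cases pws with
  | false =>
    rw [pvPortA_false, pvAFold_plain d ct.toList [] false]
    simp [embed_plain_in_cipher_alt]
  | true =>
    rw [pvPortA_true, pvAFold_spaced d ct.toList [] false]
    unfold embed_plain_in_cipher_alt
    cases hct : ct.toList with
    | nil => simp [pvALoop]
    | cons c cs' =>
      simp only [Bool.not_true, Bool.false_eq_true, if_false, List.nil_append]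
      rw [pvALoop_false_start d c cs',
        pvALoop_runs d (c :: cs').length (c :: cs') le_rfl c cs' rfl]
      cases hm : pvMapped d c <;> simp
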